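-- pv_equiv track=rewrite | github.com/rafanthx13/competitive-programming | marathon-codes/Maratonas/U_._R_._I/3. string/string-1024.py | pass3
-- ===== SOURCE A (Python) =====
-- def pass3(s):
--   # range(len(s)//2, len(s))
--   l = ""
--   for index in range(len(s)):
--     i = s[index]
--     if( index+1 > len(s)//2):
--       l = l + chr(ord(i) - 1)
--     else:
--       l = l + i
--   return l
-- ===== SOURCE B (Python) =====
-- def pass3(s):
--   mid = len(s) // 2
--   return s[:mid] + ''.join(chr(ord(c) - 1) for c in s[mid:])
-- ===== Notes on version B (the rewrite author's own statement) =====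
-- stated objective: simpler
-- what changed: Replaces the indexed loop with a per-index branch and quadratic string concatenation by a static partition at mid = len(s)//2: the unchanged prefix slice plus a linear join over the shifted suffix.
import Mathlib
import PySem

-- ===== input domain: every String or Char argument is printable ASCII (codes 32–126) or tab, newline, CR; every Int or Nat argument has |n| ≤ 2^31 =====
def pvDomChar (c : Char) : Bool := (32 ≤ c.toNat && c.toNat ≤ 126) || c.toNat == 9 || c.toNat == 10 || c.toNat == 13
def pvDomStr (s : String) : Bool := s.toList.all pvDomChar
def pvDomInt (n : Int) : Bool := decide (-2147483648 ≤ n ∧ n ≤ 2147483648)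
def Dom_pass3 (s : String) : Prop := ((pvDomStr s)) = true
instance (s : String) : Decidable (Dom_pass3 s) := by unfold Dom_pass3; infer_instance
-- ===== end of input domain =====

-- B replaces the per-index branch of A's single loop by a static split at mid = len(s)//2 (simpler decomposition).


-- ===== PORT A =====
-- loop over range(len(s)) with s[index], accumulating into l; branch on index+1 > len(s)//2
def pass3 (s : String) : String :=
  String.mk ((PySem.List.enumerate s.toList 0).foldl
    (fun l p =>
      if p.1 + 1 > PySem.Int.floordiv (s.toList.length : Int) 2 then
        l ++ [Char.ofNat (p.2.toNat - 1)]
      else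
        l ++ [p.2]) [])

-- ===== PORT B =====
-- mid = len(s)//2; s[:mid] + shifted s[mid:]
def pass3_alt (s : String) : String :=
  let mid := s.toList.length / 2
  String.mk (s.toList.take mid ++ (s.toList.drop mid).map (fun c => Char.ofNat (c.toNat - 1)))

-- ===== PRECONDITION & SPEC =====
def Spec_pass3 (s : String) (out : String) : Prop := out = pass3_alt s
instance (s : String) (out : String) : Decidable (Spec_pass3 s out) := by unfold Spec_pass3; infer_instance

-- ===== CLAIM (what is proved, stated in full; the proofs are below) =====
def Claim_equal_pass3 : Prop := ∀ (s : String), Dom_pass3 s → Spec_pass3 s (pass3 s)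

-- ===== LEMMAS AND PROOFS =====

-- On indices all < m, the branch keeps the character.
theorem pv_map_keep (m : Int) (l : List Char) : ∀ (a : Int), a + l.length ≤ m →
    (PySem.List.enumerate l a).map
      (fun p : Int × Char => if p.1 + 1 > m then Char.ofNat (p.2.toNat - 1) else p.2) = l := by
  induction l with
  | nil => intro a _; simp [PySem.List.enumerate_nil]
  | cons c cs ih =>
    intro a h
    simp only [List.length_cons] at h
    rw [PySem.List.enumerate_cons]
    simp only [List.map_cons]
    rw [if_neg (by push_cast at h ⊢; omega), ih (a + 1) (by push_cast at h ⊢; omega)]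

-- On indices all ≥ m, the branch shifts the character.
theorem pv_map_shift (m : Int) (l : List Char) : ∀ (a : Int), m ≤ a →
    (PySem.List.enumerate l a).map
      (fun p : Int × Char => if p.1 + 1 > m then Char.ofNat (p.2.toNat - 1) else p.2) =
      l.map (fun c => Char.ofNat (c.toNat - 1)) := by
  induction l with
  | nil => intro a _; simp [PySem.List.enumerate_nil]
  | cons c cs ih =>
    intro a h
    rw [PySem.List.enumerate_cons]
    simp only [List.map_cons]
    rw [if_pos (by omega), ih (a + 1) (by omega)]

-- The branched map over enumerated indices is a split at m.
theorem pv_split (m : Nat) (l : List Char) (hm : m ≤ l.length) :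
    (PySem.List.enumerate l 0).map
      (fun p : Int × Char => if p.1 + 1 > (m : Int) then Char.ofNat (p.2.toNat - 1) else p.2) =
      l.take m ++ (l.drop m).map (fun c => Char.ofNat (c.toNat - 1)) := by
  conv_lhs => rw [show l = l.take m ++ l.drop m from (List.take_append_drop _ _).symm]
  rw [PySem.List.enumerate_append, List.map_append]
  congr 1
  · exact pv_map_keep _ _ 0 (by simp [List.length_take])
  · exact pv_map_shift _ _ _ (by simp [List.length_take]; omega)

theorem pv_core (l : List Char) :
    (PySem.List.enumerate l 0).foldl
      (fun acc (p : Int × Char) =>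
        if p.1 + 1 > PySem.Int.floordiv (l.length : Int) 2 then
          acc ++ [Char.ofNat (p.2.toNat - 1)]
        else
          acc ++ [p.2]) [] =
      l.take (l.length / 2) ++ (l.drop (l.length / 2)).map (fun c => Char.ofNat (c.toNat - 1)) := by
  have hm : PySem.Int.floordiv (l.length : Int) 2 = ((l.length / 2 : Nat) : Int) := by
    simp only [PySem.Int.floordiv]
    rw [Int.fdiv_eq_ediv]
    simp

  rw [hm]
  have hfun : (fun (acc : List Char) (p : Int × Char) =>
      if p.1 + 1 > ((l.length / 2 : Nat) : Int) then acc ++ [Char.ofNat (p.2.toNat - 1)]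
      else acc ++ [p.2]) =
      (fun acc p => acc ++ [if p.1 + 1 > ((l.length / 2 : Nat) : Int) then
        Char.ofNat (p.2.toNat - 1) else p.2]) := by
    funext acc p; split <;> rfl
  rw [hfun]
  have hfold := PySem.List.foldl_append_singleton_eq_map
    (f := fun p : Int × Char =>
      if p.1 + 1 > ((l.length / 2 : Nat) : Int) then Char.ofNat (p.2.toNat - 1) else p.2)
    (l := PySem.List.enumerate l 0) (acc := ([] : List Char))
  simp only [List.nil_append] at hfold
  rw [hfold]
  exact pv_split (l.length / 2) l (Nat.div_le_self _ _)

-- ===== VERDICT (by name: the statement is the Claim_ definition above) =====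
theorem pass3_spec : Claim_equal_pass3 := by
  intro s _
  unfold Spec_pass3 pass3 pass3_alt
  rw [pv_core]
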